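-- pv_equiv track=rewrite | github.com/hazelhpham/DSA | Glass door - interns/file2.py | findOasisWithObstacles
-- ===== SOURCE A (Python) =====
-- def findOasisWithObstacles(matrix, gas):
--     ROWS, COLS = len(matrix), len(matrix[0])
--     directions = [[1,0], [-1,0], [0,1], [0,-1]]
--     start = None
--     for r in range(ROWS):
--         for c in range(COLS):
--             if matrix[r][c] == 'c':
--                 start = (r,c)
--                 break
--         if start: #this is because the outer loop might still be running if we dont break
--             break
--     if not start:
--         return False #we have never found the car to begin with.
--     dp = {}
--     def dfs(x, y, remaining_gas):
--         if (x,y) in dp: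
--             return dp[(x,y)]
--         #out of the bounds of obstacles
--         if not( 0 <= x < ROWS and 0 <= y < COLS) or matrix[x][y] == 'r' or remaining_gas == 0:
--             return False
--         #reaching the oasis
--         if matrix[x][y] == 'o':
--             return True
--         #mark cell as visited for this path
--         dp[(x,y)] = False
--         for dx, dy in directions:
--             if dfs(x+dx, y+dy, remaining_gas-1):
--                 dp[(x,y)] = True
--                 break
--         return dp[(x,y)]
--     return dfs(start[0], start[1], gas)
-- ===== SOURCE B (Python) =====
-- def findOasisWithObstacles(matrix, gas):
--     ROWS, COLS = len(matrix), len(matrix[0])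
--     directions = [[1, 0], [-1, 0], [0, 1], [0, -1]]
--     start = None
--     for r in range(ROWS):
--         for c in range(COLS):
--             if matrix[r][c] == 'c':
--                 start = (r, c)
--                 break
--         if start:
--             break
--     if not start:
--         return False
--     # iterative DFS: explicit stack of frames [x, y, remaining_gas, next_dir_index]
--     dp = {}
--     stack = [[start[0], start[1], gas, 0]]
--     result = False
--     while stack:
--         x, y, g, i = stack[-1]
--         if i == 0:
--             # first visit of this frame: run the guards
--             if (x, y) in dp:
--                 result = dp[(x, y)]
--                 stack.pop()
--                 continue
--             if not (0 <= x < ROWS and 0 <= y < COLS) or matrix[x][y] == 'r' or g == 0: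
--                 result = False
--                 stack.pop()
--                 continue
--             if matrix[x][y] == 'o':
--                 result = True
--                 stack.pop()
--                 continue
--             dp[(x, y)] = False
--         else:
--             # a child frame just resolved into `result`
--             if result:
--                 dp[(x, y)] = True
--                 stack.pop()
--                 continue
--         if i == 4:
--             result = dp[(x, y)]
--             stack.pop()
--             continue
--         dx, dy = directions[i]
--         stack[-1][3] = i + 1
--         stack.append([x + dx, y + dy, g - 1, 0])
--     return result
-- ===== Notes on version B (the rewrite author's own statement) =====
-- stated objective: alternative
-- what changed: Replaces the recursive memoized DFS with an iterative explicit-stack machine over frames (x, y, gas, next-direction-index) that reproduces the same visit order and memoization policy without recursion.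
-- outside the precondition, e.g. on findOasisWithObstacles([['c', 'x'], ['r']], 0): A returns False, B returns False
import Mathlib
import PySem

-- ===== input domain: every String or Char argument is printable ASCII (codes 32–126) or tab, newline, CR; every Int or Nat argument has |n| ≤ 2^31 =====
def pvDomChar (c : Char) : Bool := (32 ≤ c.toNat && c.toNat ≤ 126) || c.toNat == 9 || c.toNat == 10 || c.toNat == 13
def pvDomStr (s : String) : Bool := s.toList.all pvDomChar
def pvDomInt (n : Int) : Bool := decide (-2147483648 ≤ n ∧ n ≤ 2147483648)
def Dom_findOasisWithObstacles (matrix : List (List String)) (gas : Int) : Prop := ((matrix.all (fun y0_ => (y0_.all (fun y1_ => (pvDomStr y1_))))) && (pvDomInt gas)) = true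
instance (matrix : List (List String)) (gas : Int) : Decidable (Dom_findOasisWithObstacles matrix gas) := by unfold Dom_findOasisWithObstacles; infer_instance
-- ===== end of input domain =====

-- B replaces A's recursive memoized DFS by an iterative explicit-stack machine with the same
-- visit order and memoization policy (objective: alternative decomposition, same cost).

-- ===== PORT A =====
-- matrix[x][y]; only evaluated at in-range nonnegative indices under Pre_, where it is exact
def pvCell (m : List (List String)) (x y : Int) : String :=
  (PySem.List.pyGet? ((PySem.List.pyGet? m x).getD []) y).getD ""

def pvDirs : List (Int × Int) := [(1, 0), (-1, 0), (0, 1), (0, -1)]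

-- inner 'for c in range(COLS)' with break: first c with matrix[r][c] == 'c'
def pvFindCarInRow (m : List (List String)) (r : Int) : List Int → Option (Int × Int)
  | [] => none
  | c :: cs => if pvCell m r c = "c" then some (r, c) else pvFindCarInRow m r cs

-- outer 'for r in range(ROWS)' with 'if start: break'
def pvFindCar (m : List (List String)) (C : Int) : List Int → Option (Int × Int)
  | [] => none
  | r :: rs =>
    match pvFindCarInRow m r (PySem.List.pyRange 0 C 1) with
    | some s => some s
    | none => pvFindCar m C rs

-- A's dfs, with a fuel parameter making the Python recursion structural (none = fuel ran out;
-- the top level passes fuel R*C+2, proved sufficient below): pvDfsA returns (dfs value, dp).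
mutual
def pvDfsA (m : List (List String)) (R C : Int) :
    Nat → Int → Int → Int → PySem.Dict (Int × Int) Bool →
    Option (Bool × PySem.Dict (Int × Int) Bool)
  | 0, _, _, _, _ => none
  | f + 1, x, y, g, dp =>
    match PySem.Dict.get? dp (x, y) with
    | some b => some (b, dp)
    | none =>
      if ¬(0 ≤ x ∧ x < R ∧ 0 ≤ y ∧ y < C) ∨ pvCell m x y = "r" ∨ g = 0 then some (false, dp)
      else if pvCell m x y = "o" then some (true, dp)
      else
        match pvLoopA m R C f x y g (PySem.Dict.insert dp (x, y) false) pvDirs with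
        | none => none
        | some dp2 => some (PySem.Dict.getD dp2 (x, y) false, dp2)
  termination_by f _ _ _ _ => (f, 0)
-- the 'for dx, dy in directions' loop with its break; returns the dp after the loop
def pvLoopA (m : List (List String)) (R C : Int) :
    Nat → Int → Int → Int → PySem.Dict (Int × Int) Bool → List (Int × Int) →
    Option (PySem.Dict (Int × Int) Bool)
  | _, _, _, _, dp, [] => some dp
  | f, x, y, g, dp, (dx, dy) :: ds =>
    match pvDfsA m R C f (x + dx) (y + dy) (g - 1) dp with
    | none => none
    | some (b, dp') =>
      if b then some (PySem.Dict.insert dp' (x, y) true)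
      else pvLoopA m R C f x y g dp' ds
  termination_by f _ _ _ _ ds => (f, ds.length + 1)
end

def findOasisWithObstacles (matrix : List (List String)) (gas : Int) : Bool :=
  let R : Int := matrix.length
  let C : Int := ((PySem.List.pyGet? matrix 0).getD []).length
  match pvFindCar matrix C (PySem.List.pyRange 0 R 1) with
  | none => false
  | some (sr, sc) =>
    match pvDfsA matrix R C (R.toNat * C.toNat + 2) sr sc gas PySem.Dict.empty with
    | none => false
    | some (b, _) => b

-- ===== PORT B =====
-- 'if i == 4: resolve; else: push child for direction i and bump the frame index' (tail of the loop body)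
def pvAdvance :
    List (Int × Int × Int × Int) → PySem.Dict (Int × Int) Bool → Bool →
    (List (Int × Int × Int × Int) × PySem.Dict (Int × Int) Bool × Bool) ⊕ Bool
  | [], _, res => Sum.inr res
  | (x, y, g, i) :: rest, dp, res =>
    if i = 4 then Sum.inl (rest, dp, PySem.Dict.getD dp (x, y) false)
    else
      let d := (PySem.List.pyGet? pvDirs i).getD (0, 0)
      Sum.inl ((x + d.1, y + d.2, g - 1, 0) :: (x, y, g, i + 1) :: rest, dp, res)

-- one iteration of B's while loop: state = (stack of frames (x,y,gas,i), dp, result)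
def pvStepB (m : List (List String)) (R C : Int) :
    List (Int × Int × Int × Int) × PySem.Dict (Int × Int) Bool × Bool →
    (List (Int × Int × Int × Int) × PySem.Dict (Int × Int) Bool × Bool) ⊕ Bool
  | ([], _, res) => Sum.inr res
  | ((x, y, g, i) :: rest, dp, res) =>
    if i = 0 then
      match PySem.Dict.get? dp (x, y) with
      | some b => Sum.inl (rest, dp, b)
      | none =>
        if ¬(0 ≤ x ∧ x < R ∧ 0 ≤ y ∧ y < C) ∨ pvCell m x y = "r" ∨ g = 0 then
          Sum.inl (rest, dp, false)
        else if pvCell m x y = "o" then Sum.inl (rest, dp, true)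
        else pvAdvance ((x, y, g, i) :: rest) (PySem.Dict.insert dp (x, y) false) res
    else
      if res then Sum.inl (rest, PySem.Dict.insert dp (x, y) true, true)
      else pvAdvance ((x, y, g, i) :: rest) dp res

-- the while loop, as fuel-indexed iteration of pvStepB (none = fuel ran out; the fuel passed
-- by the top level is proved sufficient below)
def pvRunB (m : List (List String)) (R C : Int) :
    Nat → List (Int × Int × Int × Int) × PySem.Dict (Int × Int) Bool × Bool → Option Bool
  | 0, _ => none
  | f + 1, s =>
    match pvStepB m R C s with
    | Sum.inr b => some b
    | Sum.inl s' => pvRunB m R C f s'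

def findOasisWithObstacles_alt (matrix : List (List String)) (gas : Int) : Bool :=
  let R : Int := matrix.length
  let C : Int := ((PySem.List.pyGet? matrix 0).getD []).length
  match pvFindCar matrix C (PySem.List.pyRange 0 R 1) with
  | none => false
  | some (sr, sc) =>
    (pvRunB matrix R C (8 ^ (R.toNat * C.toNat + 2) + 1)
      ([(sr, sc, gas, 0)], PySem.Dict.empty, false)).getD false

-- ===== PRECONDITION & SPEC =====
-- Pre_ excludes the empty matrix (A's len(matrix[0]) raises IndexError) and ragged matrices
-- with a row shorter than the first row, on which A's cell indexing can raise IndexError.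
def Pre_findOasisWithObstacles (matrix : List (List String)) (gas : Int) : Prop :=
  matrix ≠ [] ∧ ∀ row ∈ matrix, (matrix.headD []).length ≤ row.length

instance (matrix : List (List String)) (gas : Int) : Decidable (Pre_findOasisWithObstacles matrix gas) := by
  unfold Pre_findOasisWithObstacles; infer_instance

def pvWitness_findOasisWithObstacles : List (List String) × Int := ([["c", "x"], ["x", "o"]], 5)

def Spec_findOasisWithObstacles (matrix : List (List String)) (gas : Int) (out : Bool) : Prop := out = findOasisWithObstacles_alt matrix gas
instance (matrix : List (List String)) (gas : Int) (out : Bool) : Decidable (Spec_findOasisWithObstacles matrix gas out) := by unfold Spec_findOasisWithObstacles; infer_instance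

-- ===== CLAIM (what is proved, stated in full; the proofs are below) =====
def Claim_equal_findOasisWithObstacles : Prop := ∀ (matrix : List (List String)) (gas : Int), Dom_findOasisWithObstacles matrix gas → Pre_findOasisWithObstacles matrix gas → Spec_findOasisWithObstacles matrix gas (findOasisWithObstacles matrix gas)

-- ===== LEMMAS AND PROOFS =====

-- fuel monotonicity of the machine
lemma pvRunB_mono (m : List (List String)) (R C : Int) :
    ∀ {f f' : Nat}, f ≤ f' → ∀ {s out}, pvRunB m R C f s = some out → pvRunB m R C f' s = some out := by
  intro f
  induction f with
  | zero => intro f' _ s out h; simp [pvRunB] at h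
  | succ f ih =>
    intro f' hle s out h
    obtain ⟨f'', rfl⟩ : ∃ f'', f' = f'' + 1 := ⟨f' - 1, by omega⟩
    simp only [pvRunB] at h ⊢
    cases hs : pvStepB m R C s with
    | inr b => simp [hs] at h ⊢; exact h
    | inl s' => simp [hs] at h ⊢; exact ih (by omega) h

lemma pvRunB_step (m : List (List String)) (R C : Int) {s s' out} {f : Nat}
    (hs : pvStepB m R C s = Sum.inl s') (h : pvRunB m R C f s' = some out) :
    pvRunB m R C (f + 1) s = some out := by
  simp [pvRunB, hs, h]

-- key preservation: dfs/loop only ever add keys to dp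
def pvKeysP (m : List (List String)) (R C : Int) (f : Nat) : Prop :=
  ∀ x y g dp b dp', pvDfsA m R C f x y g dp = some (b, dp') →
    ∀ k, (PySem.Dict.get? dp k).isSome → (PySem.Dict.get? dp' k).isSome

lemma pvLoopA_keys_of (m : List (List String)) (R C : Int) (f : Nat) (hP : pvKeysP m R C f) :
    ∀ ds x y g dp dp2, pvLoopA m R C f x y g dp ds = some dp2 →
      ∀ k, (PySem.Dict.get? dp k).isSome → (PySem.Dict.get? dp2 k).isSome := by
  intro ds
  induction ds with
  | nil => intro x y g dp dp2 h k hk; simp [pvLoopA] at h; subst h; exact hk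
  | cons d ds ih =>
    intro x y g dp dp2 h k hk
    obtain ⟨dx, dy⟩ := d
    simp only [pvLoopA] at h
    cases hch : pvDfsA m R C f (x + dx) (y + dy) (g - 1) dp with
    | none => simp [hch] at h
    | some p =>
      obtain ⟨b, dp'⟩ := p
      simp only [hch] at h
      have hk' := hP _ _ _ _ _ _ hch k hk
      by_cases hb : b = true
      · subst hb; simp at h; subst h
        rw [PySem.Dict.get?_insert]
        split <;> simp [hk']
      · simp [hb] at h
        exact ih _ _ _ _ _ h k hk'

lemma pvDfsA_keys (m : List (List String)) (R C : Int) : ∀ f, pvKeysP m R C f := by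
  intro f
  induction f with
  | zero => intro x y g dp b dp' h; simp [pvDfsA] at h
  | succ f ih =>
    intro x y g dp b dp' h k hk
    simp only [pvDfsA] at h
    cases hc : PySem.Dict.get? dp (x, y) with
    | some b0 => simp [hc] at h; obtain ⟨_, rfl⟩ := h; exact hk
    | none =>
      simp only [hc] at h
      split at h
      · simp at h; obtain ⟨_, rfl⟩ := h; exact hk
      · split at h
        · simp at h; obtain ⟨_, rfl⟩ := h; exact hk
        · cases hl : pvLoopA m R C f x y g (PySem.Dict.insert dp (x, y) false) pvDirs with
          | none => simp [hl] at h
          | some dp2 =>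
            simp [hl] at h
            obtain ⟨_, rfl⟩ := h
            have hk1 : (PySem.Dict.get? (PySem.Dict.insert dp (x, y) false) k).isSome := by
              rw [PySem.Dict.get?_insert]; split <;> simp [hk]
            exact pvLoopA_keys_of m R C f ih _ _ _ _ _ _ hl k hk1

-- counting in-bounds cells missing from dp
def pvCells (R C : Int) : List (Int × Int) :=
  (List.range R.toNat ×ˢ List.range C.toNat).map (fun p => ((p.1 : Int), (p.2 : Int)))

def pvMissing (R C : Int) (dp : PySem.Dict (Int × Int) Bool) : Nat :=
  (pvCells R C).countP (fun k => (PySem.Dict.get? dp k).isNone)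

lemma mem_pvCells {R C x y : Int} (hx0 : 0 ≤ x) (hxR : x < R) (hy0 : 0 ≤ y) (hyC : y < C) :
    (x, y) ∈ pvCells R C := by
  unfold pvCells
  refine List.mem_map.mpr ⟨(x.toNat, y.toNat), ?_, ?_⟩
  · exact List.pair_mem_product.mpr ⟨by simp only [List.mem_range]; omega,
      by simp only [List.mem_range]; omega⟩
  · simp [Int.toNat_of_nonneg hx0, Int.toNat_of_nonneg hy0]

lemma pvCountP_lt {α : Type} {p q : α → Bool} :
    ∀ {l : List α}, (∀ a ∈ l, p a = true → q a = true) →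
      ∀ {a}, a ∈ l → p a = false → q a = true → l.countP p < l.countP q := by
  intro l
  induction l with
  | nil => intro _ a ha; simp at ha
  | cons x l ih =>
    intro hpq a ha hp hq
    have hmono : l.countP p ≤ l.countP q :=
      List.countP_mono_left (fun b hb => hpq b (List.mem_cons_of_mem _ hb))
    simp only [List.countP_cons]
    rcases List.mem_cons.mp ha with rfl | ha'
    · rw [hp, hq]; simp; omega
    · have := ih (fun b hb => hpq b (List.mem_cons_of_mem _ hb)) ha' hp hq
      have hx : p x = true → q x = true := hpq x (List.mem_cons_self ..)
      cases hpx : p x <;> cases hqx : q x <;> simp_all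

lemma pvMissing_le_of_keys {R C : Int} {dp dp' : PySem.Dict (Int × Int) Bool}
    (h : ∀ k, (PySem.Dict.get? dp k).isSome → (PySem.Dict.get? dp' k).isSome) :
    pvMissing R C dp' ≤ pvMissing R C dp := by
  apply List.countP_mono_left
  intro k _ hk
  by_contra hc
  simp only [Option.isNone_iff_eq_none] at hk hc
  have := h k (by simp [Option.isSome_iff_ne_none, hc])
  simp [Option.isSome_iff_ne_none, hk] at this

lemma pvMissing_insert_lt {R C x y : Int} {dp : PySem.Dict (Int × Int) Bool}
    (hx0 : 0 ≤ x) (hxR : x < R) (hy0 : 0 ≤ y) (hyC : y < C)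
    (hnone : PySem.Dict.get? dp (x, y) = none) :
    pvMissing R C (PySem.Dict.insert dp (x, y) false) < pvMissing R C dp := by
  apply pvCountP_lt (a := (x, y))
  · intro k _ hk
    rw [PySem.Dict.get?_insert] at hk
    split at hk
    · simp at hk
    · exact hk
  · exact mem_pvCells hx0 hxR hy0 hyC
  · simp [PySem.Dict.get?_insert_self]
  · simp [hnone]

-- fuel sufficiency: with more fuel than missing cells, dfs/loop return a value
def pvTotalP (m : List (List String)) (R C : Int) (f : Nat) : Prop :=
  ∀ x y g dp, pvMissing R C dp < f → (pvDfsA m R C f x y g dp).isSome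

lemma pvLoopA_total_of (m : List (List String)) (R C : Int) (f : Nat) (hP : pvTotalP m R C f) :
    ∀ ds x y g dp, pvMissing R C dp < f → (pvLoopA m R C f x y g dp ds).isSome := by
  intro ds
  induction ds with
  | nil => intro x y g dp _; simp [pvLoopA]
  | cons d ds ih =>
    intro x y g dp hm
    obtain ⟨dx, dy⟩ := d
    simp only [pvLoopA]
    cases hch : pvDfsA m R C f (x + dx) (y + dy) (g - 1) dp with
    | none => have := hP (x + dx) (y + dy) (g - 1) dp hm; simp [hch] at this
    | some p =>
      obtain ⟨b, dp'⟩ := p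
      by_cases hb : b = true
      · subst hb; simp
      · simp only [hb]
        have hkeys := pvDfsA_keys m R C f _ _ _ _ _ _ hch
        have : pvMissing R C dp' ≤ pvMissing R C dp := pvMissing_le_of_keys hkeys
        simpa [hb] using ih x y g dp' (by omega)

lemma pvDfsA_total (m : List (List String)) (R C : Int) : ∀ f, pvTotalP m R C f := by
  intro f
  induction f with
  | zero => intro x y g dp hm; omega
  | succ f ih =>
    intro x y g dp hm
    simp only [pvDfsA]
    cases hc : PySem.Dict.get? dp (x, y) with
    | some b => simp
    | none =>
      simp only []
      split
      · simp
      · rename_i hguard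
        split
        · simp
        · obtain ⟨hA, -⟩ := not_or.mp hguard
          obtain ⟨hx0, hxR, hy0, hyC⟩ := not_not.mp hA
          have hlt : pvMissing R C (PySem.Dict.insert dp (x, y) false) < pvMissing R C dp :=
            pvMissing_insert_lt hx0 hxR hy0 hyC hc
          have := pvLoopA_total_of m R C f ih pvDirs x y g
            (PySem.Dict.insert dp (x, y) false) (by omega)
          cases hl : pvLoopA m R C f x y g (PySem.Dict.insert dp (x, y) false) pvDirs with
          | none => simp [hl] at this
          | some dp2 => simp

-- simulation: a completed dfs call is matched by the machine, frame by frame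
def pvSimP (m : List (List String)) (R C : Int) (f : Nat) : Prop :=
  ∀ x y g dp b dp', pvDfsA m R C f x y g dp = some (b, dp') →
    ∀ rest res f2 out, pvRunB m R C f2 (rest, dp', b) = some out →
      pvRunB m R C (8 ^ f + f2) ((x, y, g, 0) :: rest, dp, res) = some out

lemma pvSimLoop (m : List (List String)) (R C : Int) (f : Nat) (hf : pvSimP m R C f) :
    ∀ ds (i : Int), 1 ≤ i → i.toNat + ds.length = 4 → pvDirs.drop i.toNat = ds →
      ∀ x y g dp dp2, pvLoopA m R C f x y g dp ds = some dp2 →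
        ∀ rest f2 out,
          pvRunB m R C f2 (rest, dp2, PySem.Dict.getD dp2 (x, y) false) = some out →
          pvRunB m R C (ds.length * (8 ^ f + 2) + 1 + f2)
            ((x, y, g, i) :: rest, dp, false) = some out := by
  intro ds
  induction ds with
  | nil =>
    intro i hi1 hlen hdrop x y g dp dp2 hl rest f2 out hcont
    simp only [pvLoopA, Option.some.injEq] at hl
    subst hl
    have hi4 : i = 4 := by simp at hlen; omega
    subst hi4
    simp only [List.length_nil]
    have hstep : pvStepB m R C ((x, y, g, (4 : Int)) :: rest, dp, false) =
        Sum.inl (rest, dp, PySem.Dict.getD dp (x, y) false) := by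
      simp [pvStepB, pvAdvance]
    have : (0 : Nat) * (8 ^ f + 2) + 1 + f2 = f2 + 1 := by omega
    rw [this]
    exact pvRunB_step m R C hstep hcont
  | cons d ds ih =>
    intro i hi1 hlen hdrop x y g dp dp2 hl rest f2 out hcont
    obtain ⟨dx, dy⟩ := d
    obtain ⟨n, rfl⟩ : ∃ n : Nat, i = (n : Int) := ⟨i.toNat, by omega⟩
    have hton : ((n : Int)).toNat = n := by omega
    rw [hton] at hlen hdrop
    have hn1 : 1 ≤ n := by omega
    have hito : n < 4 := by simp at hlen; omega
    have hi4 : (((n : Int)) = 4) = False := by simp; omega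
    have hi0 : (((n : Int)) = 0) = False := by simp; omega
    -- directions[i] = (dx, dy)
    have hget : (PySem.List.pyGet? pvDirs (n : Int)).getD (0, 0) = (dx, dy) := by
      rw [PySem.List.pyGet?_natCast, ← List.head?_drop, hdrop]
      rfl
    -- the push step
    have hstep : pvStepB m R C ((x, y, g, (n : Int)) :: rest, dp, false) =
        Sum.inl ((x + dx, y + dy, g - 1, 0) :: (x, y, g, (n : Int) + 1) :: rest, dp, false) := by
      simp only [pvStepB, pvAdvance, hi0, hi4, if_false, Bool.false_eq_true, hget]
    simp only [pvLoopA] at hl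
    cases hch : pvDfsA m R C f (x + dx) (y + dy) (g - 1) dp with
    | none => simp [hch] at hl
    | some p =>
      obtain ⟨bc, dpc⟩ := p
      simp only [hch] at hl
      cases bc with
      | true =>
        -- child succeeded: parent marks true and pops
        simp only [if_true] at hl
        rw [Option.some.injEq] at hl
        subst hl
        have hstep2 : pvStepB m R C ((x, y, g, (n : Int) + 1) :: rest, dpc, true) =
            Sum.inl (rest, PySem.Dict.insert dpc (x, y) true, true) := by
          have hne : (((n : Int) + 1) = 0) = False := by simp; omega
          simp only [pvStepB, hne, if_false, if_true]
        have hcont' : pvRunB m R C f2 (rest, PySem.Dict.insert dpc (x, y) true, true) = some out := by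
          have hgd : PySem.Dict.getD (PySem.Dict.insert dpc (x, y) true) (x, y) false = true := by
            rw [PySem.Dict.getD_insert]; simp
          rwa [hgd] at hcont
        have h3 := pvRunB_step m R C hstep2 hcont'
        have h4 := hf _ _ _ _ _ _ hch ((x, y, g, (n : Int) + 1) :: rest) false (f2 + 1) out h3
        have h5 := pvRunB_step m R C hstep h4
        refine pvRunB_mono m R C ?_ h5
        simp only [List.length_cons]
        have h1 : 8 ^ f + 2 ≤ (ds.length + 1) * (8 ^ f + 2) := Nat.le_mul_of_pos_left _ (by omega)
        omega
      | false =>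
        -- child failed: continue with the next direction
        simp only [Bool.false_eq_true, if_false] at hl
        have hdrop' : pvDirs.drop ((n : Int) + 1).toNat = ds := by
          have h1 : ((n : Int) + 1).toNat = n + 1 := by omega
          rw [h1, ← List.tail_drop, hdrop]
          rfl
        have h3 := ih ((n : Int) + 1) (by omega) (by simp at hlen ⊢; omega) hdrop' x y g dpc dp2 hl rest f2 out hcont
        have h4 := hf _ _ _ _ _ _ hch ((x, y, g, (n : Int) + 1) :: rest) false _ out h3
        have h5 := pvRunB_step m R C hstep h4
        refine pvRunB_mono m R C ?_ h5
        simp only [List.length_cons]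
        have hmul : (ds.length + 1) * (8 ^ f + 2) = ds.length * (8 ^ f + 2) + (8 ^ f + 2) := by ring
        omega

lemma pvSimDfs (m : List (List String)) (R C : Int) : ∀ f, pvSimP m R C f := by
  intro f
  induction f with
  | zero => intro x y g dp b dp' h; simp [pvDfsA] at h
  | succ f ih =>
    intro x y g dp b dp' h rest res f2 out hcont
    have h8 : 1 ≤ 8 ^ (f + 1) := Nat.one_le_pow _ _ (by omega)
    simp only [pvDfsA] at h
    cases hc : PySem.Dict.get? dp (x, y) with
    | some b0 =>
      simp only [hc, Option.some.injEq, Prod.mk.injEq] at h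
      obtain ⟨hb, hdp⟩ := h
      rw [← hb, ← hdp] at hcont
      have hstep : pvStepB m R C ((x, y, g, (0 : Int)) :: rest, dp, res) =
          Sum.inl (rest, dp, b0) := by
        simp only [pvStepB, hc, if_true]
      exact pvRunB_mono m R C (by omega) (pvRunB_step m R C hstep hcont)
    | none =>
      simp only [hc] at h
      by_cases hguard : ¬(0 ≤ x ∧ x < R ∧ 0 ≤ y ∧ y < C) ∨ pvCell m x y = "r" ∨ g = 0
      · rw [if_pos hguard] at h
        rw [Option.some.injEq, Prod.mk.injEq] at h
        obtain ⟨hb, hdp⟩ := h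
        rw [← hb, ← hdp] at hcont
        have hstep : pvStepB m R C ((x, y, g, (0 : Int)) :: rest, dp, res) =
            Sum.inl (rest, dp, false) := by
          simp only [pvStepB, hc, if_true]; rw [if_pos hguard]
        exact pvRunB_mono m R C (by omega) (pvRunB_step m R C hstep hcont)
      · rw [if_neg hguard] at h
        by_cases ho : pvCell m x y = "o"
        · rw [if_pos ho] at h
          rw [Option.some.injEq, Prod.mk.injEq] at h
          obtain ⟨hb, hdp⟩ := h
          rw [← hb, ← hdp] at hcont
          have hstep : pvStepB m R C ((x, y, g, (0 : Int)) :: rest, dp, res) =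
              Sum.inl (rest, dp, true) := by
            simp only [pvStepB, hc, if_true]; rw [if_neg hguard, if_pos ho]
          exact pvRunB_mono m R C (by omega) (pvRunB_step m R C hstep hcont)
        · rw [if_neg ho] at h
          cases hl : pvLoopA m R C f x y g (PySem.Dict.insert dp (x, y) false) pvDirs with
          | none => simp [hl] at h
          | some dp2 =>
            simp only [hl, Option.some.injEq, Prod.mk.injEq] at h
            obtain ⟨hb, hdp⟩ := h
            rw [← hb, ← hdp] at hcont
            have hstep : pvStepB m R C ((x, y, g, (0 : Int)) :: rest, dp, res) =
                Sum.inl ((x + 1, y + 0, g - 1, 0) :: (x, y, g, (1 : Int)) :: rest,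
                  PySem.Dict.insert dp (x, y) false, res) := by
              simp only [pvStepB, hc, if_true]; rw [if_neg hguard, if_neg ho]; rfl
            simp only [add_zero] at hstep
            rw [show pvDirs = (1, 0) :: [(-1, 0), (0, 1), (0, -1)] from rfl] at hl
            rw [pvLoopA] at hl
            simp only [add_zero] at hl
            cases hch : pvDfsA m R C f (x + 1) y (g - 1) (PySem.Dict.insert dp (x, y) false) with
            | none => rw [hch] at hl; simp at hl
            | some p =>
              obtain ⟨bc, dpc⟩ := p
              simp only [hch] at hl
              obtain ⟨f', rfl⟩ : ∃ f', f = f' + 1 := by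
                cases f with
                | zero => exact absurd hch (by simp [pvDfsA])
                | succ k => exact ⟨k, rfl⟩
              have h8f : 8 ≤ 8 ^ (f' + 1) := Nat.le_self_pow (by omega) 8
              have hpow : 8 ^ (f' + 1 + 1) = 8 ^ (f' + 1) * 8 := pow_succ 8 (f' + 1)
              cases bc with
              | true =>
                simp only [if_true] at hl
                rw [Option.some.injEq] at hl
                subst hl
                have hstep2 : pvStepB m R C ((x, y, g, (1 : Int)) :: rest, dpc, true) =
                    Sum.inl (rest, PySem.Dict.insert dpc (x, y) true, true) := rfl
                have hcont' : pvRunB m R C f2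
                    (rest, PySem.Dict.insert dpc (x, y) true, true) = some out := by
                  have hgd : PySem.Dict.getD (PySem.Dict.insert dpc (x, y) true) (x, y) false = true := by
                    rw [PySem.Dict.getD_insert]; simp
                  rwa [hgd] at hcont
                have h3 := pvRunB_step m R C hstep2 hcont'
                have h4 := ih _ _ _ _ _ _ hch ((x, y, g, (1 : Int)) :: rest) res (f2 + 1) out h3
                have h5 := pvRunB_step m R C hstep h4
                exact pvRunB_mono m R C (by omega) h5
              | false =>
                simp only [Bool.false_eq_true, if_false] at hl
                have h3 := pvSimLoop m R C (f' + 1) ih [(-1, 0), (0, 1), (0, -1)] 1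
                  (by omega) (by simp) rfl x y g dpc dp2 hl rest f2 out hcont
                have h4 := ih _ _ _ _ _ _ hch ((x, y, g, (1 : Int)) :: rest) res _ out h3
                have h5 := pvRunB_step m R C hstep h4
                refine pvRunB_mono m R C ?_ h5
                simp only [List.length_cons, List.length_nil]
                omega

-- cardinality of the cell list
lemma pvMissing_empty_le (R C : Int) :
    pvMissing R C PySem.Dict.empty ≤ R.toNat * C.toNat := by
  calc pvMissing R C PySem.Dict.empty ≤ (pvCells R C).length := List.countP_le_length
    _ = R.toNat * C.toNat := by simp [pvCells, List.length_product]

-- ===== VERDICT (by name: the statement is the Claim_ definition above) =====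
theorem findOasisWithObstacles_spec : Claim_equal_findOasisWithObstacles := by
  intro matrix gas _ _
  unfold Spec_findOasisWithObstacles
  unfold findOasisWithObstacles findOasisWithObstacles_alt
  cases hs : pvFindCar matrix (((PySem.List.pyGet? matrix 0).getD []).length : Int)
      (PySem.List.pyRange 0 (matrix.length : Int) 1) with
  | none => simp [hs]
  | some s =>
    obtain ⟨sr, sc⟩ := s
    simp only [hs]
    set R : Int := (matrix.length : Int)
    set C : Int := (((PySem.List.pyGet? matrix 0).getD []).length : Int)
    set F : Nat := R.toNat * C.toNat + 2 with hF
    have htot := pvDfsA_total matrix R C F sr sc gas PySem.Dict.empty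
      (by have := pvMissing_empty_le R C; omega)
    cases hA : pvDfsA matrix R C F sr sc gas PySem.Dict.empty with
    | none => simp [hA] at htot
    | some p =>
      obtain ⟨b, dp'⟩ := p
      have hcont : pvRunB matrix R C 1 ([], dp', b) = some b := by
        simp [pvRunB, pvStepB]
      have hsim := pvSimDfs matrix R C F sr sc gas PySem.Dict.empty b dp' hA
        [] false 1 b hcont
      simp [hsim]
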